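-- pv_equiv track=rewrite | github.com/wzygxr/shuati | class002_WealthDistributionAndDifferenceArray/Experiment.py | min_transfer_coins
-- ===== SOURCE A (Python) =====
-- from typing import List, Tuple
--
-- def min_transfer_coins(coins: List[int]) -> int:
--     n = len(coins)
--     if n <= 1:
--         return 0
--
--     # 计算金币总数和平均值
--     total = sum(coins)
--     average = total // n
--
--     # 计算Ci数组
--     c = [0] * n
--     c[0] = coins[0] - average
--     for i in range(1, n):
--         c[i] = c[i-1] + coins[i] - average
--
--     # 对Ci数组排序，找出中位数
--     c.sort()
--     median = c[n // 2]
--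
--     # 计算最小转移金币数
--     result = 0
--     for value in c:
--         result += abs(value - median)
--
--     return result
-- ===== SOURCE B (Python) =====
-- def _kth(xs, k):
--     # k-th smallest element of xs (0-based) via three-way quickselect
--     p = xs[0]
--     lows = [x for x in xs if x < p]
--     if k < len(lows):
--         return _kth(lows, k)
--     eq = len([x for x in xs if x == p])
--     if k < len(lows) + eq:
--         return p
--     return _kth([x for x in xs if x > p], k - len(lows) - eq)
--
-- def min_transfer_coins(coins):
--     n = len(coins)
--     if n <= 1:
--         return 0
--     total = sum(coins)
--     average = total // n
--     s = 0
--     c = []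
--     for x in coins:
--         s = s + x - average
--         c.append(s)
--     m = _kth(c, n // 2)
--     return sum(abs(v - m) for v in c)
-- ===== Notes on version B (the rewrite author's own statement) =====
-- stated objective: alternative
-- what changed: Replaces the full sort of the prefix-deviation array by a three-way quickselect for the n//2-th smallest element, then one linear pass summing absolute deviations; the prefix array is built by a running accumulator instead of index-by-index assignment.
import Mathlib
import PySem

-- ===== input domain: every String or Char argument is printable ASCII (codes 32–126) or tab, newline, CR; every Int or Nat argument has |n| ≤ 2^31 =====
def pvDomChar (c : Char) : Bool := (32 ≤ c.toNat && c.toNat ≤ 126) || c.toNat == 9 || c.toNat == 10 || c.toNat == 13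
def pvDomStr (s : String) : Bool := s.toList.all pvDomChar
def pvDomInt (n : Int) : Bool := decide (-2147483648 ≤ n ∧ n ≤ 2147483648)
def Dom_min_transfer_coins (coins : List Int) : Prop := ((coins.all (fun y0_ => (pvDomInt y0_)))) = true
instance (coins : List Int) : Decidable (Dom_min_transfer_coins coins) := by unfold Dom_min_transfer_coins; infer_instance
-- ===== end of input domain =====

-- B replaces the full sort + median lookup by a three-way quickselect for the
-- n//2-th smallest prefix deviation plus one linear summing pass (alternative algorithm).

-- ===== PORT A =====
def min_transfer_coins (coins : List Int) : Int :=
  let n := coins.length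
  if n ≤ 1 then 0
  else
    let total := coins.sum
    let average := PySem.Int.floordiv total (n : Int)
    -- c[0] = coins[0] - average; for i in 1..n-1: c[i] = c[i-1] + coins[i] - average
    let c := (PySem.List.pyRange 1 (n : Int) 1).foldl
      (fun acc i => acc ++ [acc.getD (acc.length - 1) 0 + PySem.List.pyGetD coins i 0 - average])
      [PySem.List.pyGetD coins 0 0 - average]
    let c2 := PySem.List.sorted c (fun x => x) false
    let median := c2.getD (n / 2) 0
    c2.foldl (fun result value => result + |value - median|) 0

-- ===== PORT B =====
-- quickselect: k-th smallest (0-based) via three-way partition on the first element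
def pvKth (xs : List Int) (k : Nat) : Int :=
  match xs with
  | [] => 0  -- unreachable in B's calls (guard for totality)
  | p :: t =>
    let lows := (p :: t).filter (fun x => decide (x < p))
    if k < lows.length then pvKth lows k
    else
      let eq := ((p :: t).filter (fun x => decide (x = p))).length
      if k < lows.length + eq then p
      else pvKth ((p :: t).filter (fun x => decide (p < x))) (k - lows.length - eq)
termination_by xs.length
decreasing_by
  · simp only [List.filter_cons, decide_eq_true_eq, lt_self_iff_false, if_false, List.length_cons]
    exact Nat.lt_succ_of_le (List.length_filter_le _ _)
  · simp only [List.filter_cons, decide_eq_true_eq, lt_self_iff_false, if_false, List.length_cons]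
    exact Nat.lt_succ_of_le (List.length_filter_le _ _)

def min_transfer_coins_alt (coins : List Int) : Int :=
  let n := coins.length
  if n ≤ 1 then 0
  else
    let total := coins.sum
    let average := PySem.Int.floordiv total (n : Int)
    -- running prefix deviation: for x in coins: s += x - average; c.append(s)
    let sc := coins.foldl
      (fun (st : Int × List Int) x => (st.1 + x - average, st.2 ++ [st.1 + x - average]))
      (0, [])
    let c := sc.2
    let m := pvKth c (n / 2)
    (c.map (fun v => |v - m|)).sum

-- ===== PRECONDITION & SPEC =====
def Spec_min_transfer_coins (coins : List Int) (out : Int) : Prop := out = min_transfer_coins_alt coins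
instance (coins : List Int) (out : Int) : Decidable (Spec_min_transfer_coins coins out) := by unfold Spec_min_transfer_coins; infer_instance

-- ===== CLAIM (what is proved, stated in full; the proofs are below) =====
def Claim_equal_min_transfer_coins : Prop := ∀ (coins : List Int), Dom_min_transfer_coins coins → Spec_min_transfer_coins coins (min_transfer_coins coins)

-- ===== LEMMAS AND PROOFS =====

-- the list of prefix deviations: pvScan avg s l = running sums of (x - avg) starting from s
def pvScan (avg : Int) : Int → List Int → List Int
  | _, [] => []
  | s, x :: t => (s + x - avg) :: pvScan avg (s + x - avg) t

def pvEnd (avg s : Int) (l : List Int) : Int := s + l.sum - l.length * avg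

theorem pvScan_length (avg : Int) : ∀ (s : Int) (l : List Int), (pvScan avg s l).length = l.length := by
  intro s l
  induction l generalizing s with
  | nil => rfl
  | cons x t ih => simp [pvScan, ih]

theorem pvScan_snoc (avg : Int) : ∀ (s : Int) (l : List Int) (x : Int),
    pvScan avg s (l ++ [x]) = pvScan avg s l ++ [pvEnd avg s l + x - avg] := by
  intro s l x
  induction l generalizing s with
  | nil => simp [pvScan, pvEnd]
  | cons y t ih =>
    simp only [List.cons_append, pvScan, ih, pvEnd, List.sum_cons, List.length_cons]
    push_cast
    ring_nf

theorem pvScan_getD_last (avg : Int) : ∀ (l : List Int) (s : Int), l ≠ [] →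
    (pvScan avg s l).getD ((pvScan avg s l).length - 1) 0 = pvEnd avg s l := by
  intro l
  induction l with
  | nil => intro s h; exact absurd rfl h
  | cons x t ih =>
    intro s _
    cases t with
    | nil => simp [pvScan, pvEnd]
    | cons y u =>
      have hne : (y :: u) ≠ ([] : List Int) := by simp
      have hlen : (pvScan avg (s + x - avg) (y :: u)).length = (y :: u).length := pvScan_length avg _ _
      have h1 : 1 ≤ (pvScan avg (s + x - avg) (y :: u)).length := by
        rw [hlen]; simp
      have hstep : (pvScan avg s (x :: y :: u)).getD ((pvScan avg s (x :: y :: u)).length - 1) 0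
          = (pvScan avg (s + x - avg) (y :: u)).getD ((pvScan avg (s + x - avg) (y :: u)).length - 1) 0 := by
        show ((s + x - avg) :: pvScan avg (s + x - avg) (y :: u)).getD
            (((s + x - avg) :: pvScan avg (s + x - avg) (y :: u)).length - 1) 0 = _
        rw [List.length_cons]
        have : (pvScan avg (s + x - avg) (y :: u)).length + 1 - 1
            = ((pvScan avg (s + x - avg) (y :: u)).length - 1) + 1 := by omega
        rw [this, List.getD_cons_succ]
      rw [hstep, ih (s + x - avg) hne]
      simp only [pvEnd, List.sum_cons, List.length_cons]
      push_cast
      ring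

theorem pvFoldB (avg : Int) : ∀ (l : List Int) (s : Int) (acc : List Int),
    (l.foldl (fun (st : Int × List Int) x => (st.1 + x - avg, st.2 ++ [st.1 + x - avg])) (s, acc)).2
      = acc ++ pvScan avg s l := by
  intro l
  induction l with
  | nil => intro s acc; simp [pvScan]
  | cons x t ih => intro s acc; simp [pvScan, ih]

theorem pvFoldA (coins : List Int) (avg : Int) : ∀ (d j : Nat), coins.length - j ≤ d → 1 ≤ j → j ≤ coins.length →
    (PySem.List.pyRange (j : Int) (coins.length : Int) 1).foldl
      (fun acc i => acc ++ [acc.getD (acc.length - 1) 0 + PySem.List.pyGetD coins i 0 - avg])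
      (pvScan avg 0 (coins.take j))
    = pvScan avg 0 coins := by
  intro d
  induction d with
  | zero =>
    intro j hd _ h2
    have hj : j = coins.length := by omega
    subst hj
    rw [PySem.List.pyRange_one_eq_nil (le_refl _), List.take_of_length_le (le_refl _)]
    rfl
  | succ d ih =>
    intro j hd h1 h2
    by_cases hj : j = coins.length
    · subst hj
      rw [PySem.List.pyRange_one_eq_nil (le_refl _), List.take_of_length_le (le_refl _)]
      rfl
    · have hjlt : j < coins.length := lt_of_le_of_ne h2 hj
      have hcast : ((j : Int) < (coins.length : Int)) := by exact_mod_cast hjlt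
      rw [PySem.List.pyRange_one_cons hcast, List.foldl_cons]
      have hne : coins.take j ≠ [] := by
        have hl : (coins.take j).length = j := by rw [List.length_take]; omega
        intro h
        rw [h] at hl
        simp at hl
        omega
      have hslen : (pvScan avg 0 (coins.take j)).length = (coins.take j).length :=
        pvScan_length avg _ _
      have hlast := pvScan_getD_last avg (coins.take j) 0 hne
      have hgetE : coins[j]? = some coins[j] := List.getElem?_eq_getElem hjlt
      have hacc : pvScan avg 0 (coins.take j) ++
          [(pvScan avg 0 (coins.take j)).getD ((pvScan avg 0 (coins.take j)).length - 1) 0 +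
            PySem.List.pyGetD coins (j : Int) 0 - avg]
          = pvScan avg 0 (coins.take (j + 1)) := by
        rw [hlast, List.take_add_one, hgetE]
        rw [PySem.List.pyGetD_natCast]
        simp only [Option.toList_some]
        rw [pvScan_snoc]
        congr 2
        rw [List.getD_eq_getElem coins 0 hjlt]
      rw [hacc]
      have hrange : (j : Int) + 1 = ((j + 1 : Nat) : Int) := by push_cast; ring
      rw [hrange]
      exact ih (j + 1) (by omega) (by omega) (by omega)

-- quickselect agrees with indexing into the sorted list
theorem pvSplit (p : Int) (xs : List Int) :
    PySem.List.sorted xs (fun x => x) false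
      = PySem.List.sorted (xs.filter (fun x => decide (x < p))) (fun x => x) false
        ++ xs.filter (fun x => decide (x = p))
        ++ PySem.List.sorted (xs.filter (fun x => decide (p < x))) (fun x => x) false := by
  apply PySem.List.sorted_id_eq_of_perm_of_pairwise
  · -- permutation
    have hf1 : (xs.filter (fun x => !decide (x < p))).filter (fun x => decide (x = p))
        = xs.filter (fun x => decide (x = p)) := by
      rw [List.filter_filter]
      apply List.filter_congr
      intro a _
      by_cases h : a = p
      · subst h; simp
      · simp [h]
    have hf2 : (xs.filter (fun x => !decide (x < p))).filter (fun x => !decide (x = p))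
        = xs.filter (fun x => decide (p < x)) := by
      rw [List.filter_filter]
      apply List.filter_congr
      intro a _
      rcases lt_trichotomy a p with h | h | h
      · simp [h, not_lt_of_gt h]
      · subst h; simp
      · simp [h, ne_of_gt h, not_lt_of_gt h]
    have hp2 : ((xs.filter (fun x => !decide (x < p))).filter (fun x => decide (x = p)) ++
        (xs.filter (fun x => !decide (x < p))).filter (fun x => !decide (x = p))).Perm
        (xs.filter (fun x => !decide (x < p))) :=
      List.filter_append_perm _ _
    rw [hf1, hf2] at hp2
    have hp1 : (xs.filter (fun x => decide (x < p)) ++ xs.filter (fun x => !decide (x < p))).Perm xs :=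
      List.filter_append_perm _ _
    refine List.Perm.trans ?_ hp1
    rw [List.append_assoc]
    exact (PySem.List.sorted_perm _ _ _).append
      (((List.Perm.refl _).append (PySem.List.sorted_perm _ _ _)).trans hp2)
  · -- sortedness of the concatenation
    have hlow : ∀ a ∈ PySem.List.sorted (xs.filter (fun x => decide (x < p))) (fun x => x) false, a < p := by
      intro a ha
      rw [PySem.List.mem_sorted] at ha
      simpa using (List.mem_filter.mp ha).2
    have heq : ∀ a ∈ xs.filter (fun x => decide (x = p)), a = p := by
      intro a ha
      simpa using (List.mem_filter.mp ha).2
    have hhigh : ∀ a ∈ PySem.List.sorted (xs.filter (fun x => decide (p < x))) (fun x => x) false, p < a := by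
      intro a ha
      rw [PySem.List.mem_sorted] at ha
      simpa using (List.mem_filter.mp ha).2
    rw [List.append_assoc, List.pairwise_append]
    refine ⟨by simpa using PySem.List.sorted_pairwise (xs.filter (fun x => decide (x < p))) (fun x => x), ?_, ?_⟩
    · rw [List.pairwise_append]
      refine ⟨?_, by simpa using PySem.List.sorted_pairwise (xs.filter (fun x => decide (p < x))) (fun x => x), ?_⟩
      · exact List.pairwise_of_forall_mem_list (fun a ha b hb => by rw [heq a ha, heq b hb])
      · intro a ha b hb
        rw [heq a ha]
        exact le_of_lt (hhigh b hb)
    · intro a ha b hb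
      rcases List.mem_append.mp hb with hb | hb
      · rw [heq b hb]; exact le_of_lt (hlow a ha)
      · exact le_of_lt ((hlow a ha).trans (hhigh b hb))

theorem pvKth_eq : ∀ (N : Nat) (xs : List Int) (k : Nat), xs.length ≤ N → k < xs.length →
    pvKth xs k = (PySem.List.sorted xs (fun x => x) false).getD k 0 := by
  intro N
  induction N with
  | zero => intro xs k h hk; omega
  | succ N ih =>
    intro xs k h hk
    match xs with
    | [] => simp at hk
    | p :: t =>
      have hN : t.length ≤ N := by simpa using h
      have e1 : (p :: t).filter (fun x => decide (x < p)) = t.filter (fun x => decide (x < p)) := by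
        simp
      have e2 : (p :: t).filter (fun x => decide (x = p)) = p :: t.filter (fun x => decide (x = p)) := by
        simp
      have e3 : (p :: t).filter (fun x => decide (p < x)) = t.filter (fun x => decide (p < x)) := by
        simp
      have hsplit := pvSplit p (p :: t)
      rw [e1, e2, e3] at hsplit
      have Ls : (PySem.List.sorted (t.filter (fun x => decide (x < p))) (fun x => x) false).length
          = (t.filter (fun x => decide (x < p))).length := by
        simp [PySem.List.length_sorted]
      have Hs : (PySem.List.sorted (t.filter (fun x => decide (p < x))) (fun x => x) false).length
          = (t.filter (fun x => decide (p < x))).length := by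
        simp [PySem.List.length_sorted]
      have hlen : (t.filter (fun x => decide (x < p))).length
          + (1 + (t.filter (fun x => decide (x = p))).length)
          + (t.filter (fun x => decide (p < x))).length = t.length + 1 := by
        have hc := congrArg List.length hsplit
        simp only [List.length_append, List.length_cons, Ls, Hs, PySem.List.length_sorted] at hc
        omega
      have hlt : (t.filter (fun x => decide (x < p))).length ≤ t.length := List.length_filter_le _ _
      have hht : (t.filter (fun x => decide (p < x))).length ≤ t.length := List.length_filter_le _ _
      rw [pvKth]
      simp only []
      rw [e1, e2, e3]
      have hk' : k < t.length + 1 := by simpa using hk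
      split_ifs with h1 h2
      · rw [hsplit]
        rw [List.getD_append _ _ _ _ (by simp only [List.length_append, Ls]; omega),
            List.getD_append _ _ _ _ (by omega)]
        exact ih _ k (le_trans hlt hN) h1
      · rw [hsplit]
        rw [List.getD_append _ _ _ _ (by simp only [List.length_append, List.length_cons, Ls] at h2 ⊢; omega)]
        rw [List.getD_append_right _ _ _ _ (by rw [Ls]; omega)]
        have hidx : k - (PySem.List.sorted (t.filter (fun x => decide (x < p))) (fun x => x) false).length
            < (p :: t.filter (fun x => decide (x = p))).length := by
          simp only [List.length_cons, Ls] at h2 ⊢; omega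
        rw [List.getD_eq_getElem _ _ hidx]
        have hmem := List.getElem_mem hidx
        rcases List.mem_cons.mp hmem with h' | h'
        · exact h'.symm
        · have := (List.mem_filter.mp h').2
          simp at this
          simpa using this.symm
      · rw [hsplit]
        rw [List.getD_append_right _ _ _ _ (by simp only [List.length_append, List.length_cons, Ls] at h2 ⊢; omega)]
        have harith : k - ((PySem.List.sorted (t.filter (fun x => decide (x < p))) (fun x => x) false)
            ++ p :: t.filter (fun x => decide (x = p))).length
            = k - (t.filter (fun x => decide (x < p))).length
              - (p :: t.filter (fun x => decide (x = p))).length := by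
          simp only [List.length_append, List.length_cons, Ls]
          omega
        rw [harith]
        exact ih _ _ (le_trans hht hN) (by simp only [List.length_cons] at h2 ⊢; omega)

-- ===== VERDICT (by name: the statement is the Claim_ definition above) =====
theorem min_transfer_coins_spec : Claim_equal_min_transfer_coins := by
  intro coins _
  show min_transfer_coins coins = min_transfer_coins_alt coins
  unfold min_transfer_coins min_transfer_coins_alt
  by_cases hn : coins.length ≤ 1
  · simp only [if_pos hn]
  · simp only [if_neg hn]
    match coins, hn with
    | x :: t, hn =>
      have hfB := pvFoldB (PySem.Int.floordiv (x :: t).sum ((x :: t).length : Int)) (x :: t) 0 []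
      rw [hfB, List.nil_append]
      have h1 : [PySem.List.pyGetD (x :: t) 0 0 - PySem.Int.floordiv (x :: t).sum ((x :: t).length : Int)]
          = pvScan (PySem.Int.floordiv (x :: t).sum ((x :: t).length : Int)) 0 ((x :: t).take 1) := by
        simp [pvScan, PySem.List.pyGetD_zero_cons]
      rw [h1]
      have hfA := pvFoldA (x :: t) (PySem.Int.floordiv (x :: t).sum ((x :: t).length : Int))
        ((x :: t).length) 1 (by omega) (by omega) (by simp)
      rw [Nat.cast_one] at hfA
      rw [hfA]
      rw [PySem.List.foldl_add, zero_add]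
      have hm := pvKth_eq (pvScan (PySem.Int.floordiv (x :: t).sum ((x :: t).length : Int)) 0 (x :: t)).length
        (pvScan (PySem.Int.floordiv (x :: t).sum ((x :: t).length : Int)) 0 (x :: t))
        ((x :: t).length / 2) (le_refl _)
        (by rw [pvScan_length]; exact Nat.div_lt_self (by simp) (by norm_num))
      rw [hm]
      exact List.Perm.sum_eq ((PySem.List.sorted_perm _ _ _).map _)
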